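-- pv_equiv track=rewrite | github.com/verypluming/SyGNS | scripts/instantiate_sp.py | schematize
-- ===== SOURCE A (Python) =====
-- def schematize(sentence, cat):
--     count = 0
--     sent = []
--     for word in sentence.split(' '):
--         if word == cat:
--             var = '{0[' + str(count) + ']}'
--             word = word.replace(cat, var)
--             count += 1
--         sent.append(word)
--     out = ' '.join(sent)
--     return out
-- ===== SOURCE B (Python) =====
-- def schematize(sentence, cat):
--     # Segment the word list into runs delimited by occurrences of cat,
--     # then reassemble: each completed run is followed by its occurrence-indexed
--     # placeholder, the trailing run closes the sentence.
--     finished, current = [], []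
--     for w in sentence.split(' '):
--         if w == cat:
--             finished.append(current)
--             current = []
--         else:
--             current.append(w)
--     pieces = []
--     for k, seg in enumerate(finished):
--         pieces.extend(seg)
--         pieces.append('{0[' + str(k) + ']}')
--     pieces.extend(current)
--     return ' '.join(pieces)
-- ===== Notes on version B (the rewrite author's own statement) =====
-- stated objective: alternative
-- what changed: Instead of A's single counting pass that rewrites each matching word in place, B segments the word list into runs delimited by occurrences of cat and then reassembles the sentence by interleaving the runs with enumerated placeholders; the per-word counter disappears.
import Mathlib
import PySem

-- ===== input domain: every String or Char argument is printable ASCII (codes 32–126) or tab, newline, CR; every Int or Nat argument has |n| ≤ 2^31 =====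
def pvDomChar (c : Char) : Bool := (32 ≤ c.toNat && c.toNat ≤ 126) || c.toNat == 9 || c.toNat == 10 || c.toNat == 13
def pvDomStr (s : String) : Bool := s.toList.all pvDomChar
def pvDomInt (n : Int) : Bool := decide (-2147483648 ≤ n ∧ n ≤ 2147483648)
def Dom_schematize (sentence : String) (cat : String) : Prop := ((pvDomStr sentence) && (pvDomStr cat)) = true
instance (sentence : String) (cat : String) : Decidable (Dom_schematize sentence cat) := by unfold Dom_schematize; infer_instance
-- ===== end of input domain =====

-- B replaces A's counting rewrite pass by run-segmentation plus an interleaving reassembly; same cost, no behavioural change.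

-- ===== PORT A =====
-- A: one pass over sentence.split(' '), threading (count, sent); on a match the word is
-- rewritten via str.replace and the counter bumped.
def schematize (sentence : String) (cat : String) : String :=
  let r := ((PySem.Chars.splitOn sentence.toList [' ']).map String.ofList).foldl
    (fun (st : Int × List String) word =>
      if word == cat then
        (st.1 + 1, st.2 ++ [PySem.Str.replace word cat ("{0[" ++ PySem.Int.toStr st.1 ++ "]}")])
      else
        (st.1, st.2 ++ [word]))
    ((0 : Int), ([] : List String))
  PySem.Str.join " " r.2

-- ===== PORT B =====
-- B: split the word list into runs (finished, current) delimited by cat, then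
-- reassemble: each finished run followed by its enumerated placeholder, then the tail run.
def schematize_alt (sentence : String) (cat : String) : String :=
  let st := ((PySem.Chars.splitOn sentence.toList [' ']).map String.ofList).foldl
    (fun (st : List (List String) × List String) w =>
      if w == cat then (st.1 ++ [st.2], ([] : List String)) else (st.1, st.2 ++ [w]))
    (([] : List (List String)), ([] : List String))
  let pieces := (PySem.List.enumerate st.1 0).foldl
    (fun acc (p : Int × List String) => acc ++ p.2 ++ ["{0[" ++ PySem.Int.toStr p.1 ++ "]}"])
    ([] : List String)
  PySem.Str.join " " (pieces ++ st.2)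

-- ===== PRECONDITION & SPEC =====
def Spec_schematize (sentence : String) (cat : String) (out : String) : Prop := out = schematize_alt sentence cat
instance (sentence : String) (cat : String) (out : String) : Decidable (Spec_schematize sentence cat out) := by unfold Spec_schematize; infer_instance

-- ===== CLAIM (what is proved, stated in full; the proofs are below) =====
def Claim_equal_schematize : Prop := ∀ (sentence : String) (cat : String), Dom_schematize sentence cat → Spec_schematize sentence cat (schematize sentence cat)

-- ===== LEMMAS AND PROOFS =====

-- placeholder string for match number n
def pvPh (n : Int) : String := "{0[" ++ PySem.Int.toStr n ++ "]}"

-- common specification: the marked word list, counter starting at n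
def pvMark (cat : String) (n : Int) : List String → List String
  | [] => []
  | w :: ws => if w == cat then pvPh n :: pvMark cat (n + 1) ws else w :: pvMark cat n ws

theorem pvGo_nil (old new : List Char) (fuel : Nat) (acc : List Char) :
    PySem.Chars.replace.go old new fuel [] acc = acc.reverse := by
  cases fuel <;> rw [PySem.Chars.replace.go] <;> simp

-- replacing a string inside itself yields `new` (Python: s.replace(s, new) == new, incl. s = '')
theorem pvReplace_self (s new : List Char) : PySem.Chars.replace s s new = new := by
  cases s with
  | nil => simp [PySem.Chars.replace]
  | cons c t =>
      rw [PySem.Chars.replace]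
      simp only [List.isEmpty_cons, List.length_cons]
      rw [PySem.Chars.replace.go]
      simp [List.isPrefixOf_iff_prefix, pvGo_nil]

theorem pvStrReplace_self (s new : String) : PySem.Str.replace s s new = new := by
  simp [PySem.Str.replace, pvReplace_self, String.ofList_toList]

-- A's loop computes acc ++ pvMark
theorem pvA_loop (cat : String) (ws : List String) (n : Int) (acc : List String) :
    (ws.foldl (fun (st : Int × List String) word =>
      if word == cat then
        (st.1 + 1, st.2 ++ [PySem.Str.replace word cat ("{0[" ++ PySem.Int.toStr st.1 ++ "]}")])
      else (st.1, st.2 ++ [word])) (n, acc)).2 = acc ++ pvMark cat n ws := by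
  induction ws generalizing n acc with
  | nil => simp [pvMark]
  | cons w ws ih =>
      by_cases h : w = cat
      · subst h
        simp only [List.foldl_cons, BEq.rfl, if_pos]
        rw [ih, pvMark, if_pos BEq.rfl]
        simp [pvStrReplace_self, pvPh]
      · simp only [List.foldl_cons]
        rw [if_neg (show ¬ ((w == cat) = true) by simpa using h)]
        rw [ih, pvMark, if_neg (show ¬ ((w == cat) = true) by simpa using h)]
        simp

-- B's segmentation step
def pvStep (cat : String) (st : List (List String) × List String) (w : String) :
    List (List String) × List String :=
  if w == cat then (st.1 ++ [st.2], ([] : List String)) else (st.1, st.2 ++ [w])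

-- the finished-segment list only ever grows on the right
theorem pvSeg_shift (cat : String) (ws : List String) (F : List (List String)) (C : List String) :
    ws.foldl (pvStep cat) (F, C)
      = (F ++ (ws.foldl (pvStep cat) ([], C)).1, (ws.foldl (pvStep cat) ([], C)).2) := by
  induction ws generalizing F C with
  | nil => simp
  | cons w ws ih =>
      by_cases h : (w == cat) = true
      · simp only [List.foldl_cons, pvStep, h, if_pos, List.nil_append]
        rw [ih (F ++ [C]) [], ih [C] []]
        simp
      · have e1 : pvStep cat (F, C) w = (F, C ++ [w]) := by simp [pvStep, h]
        have e2 : pvStep cat ([], C) w = (([] : List (List String)), C ++ [w]) := by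
          simp [pvStep, h]
        simp only [List.foldl_cons, e1, e2]
        exact ih F (C ++ [w])

-- B's reassembly of the segmentation equals the marked word list (prefixed by the open run C)
theorem pvB_loop (cat : String) (ws : List String) (C : List String) (k : Int) :
    ((PySem.List.enumerate (ws.foldl (pvStep cat) ([], C)).1 k).flatMap
        (fun p => p.2 ++ [pvPh p.1]))
      ++ (ws.foldl (pvStep cat) ([], C)).2
    = C ++ pvMark cat k ws := by
  induction ws generalizing C k with
  | nil => simp [PySem.List.enumerate_nil, pvMark]
  | cons w ws ih =>
      by_cases h : (w == cat) = true
      · simp only [List.foldl_cons, pvStep, h, if_pos, List.nil_append]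
        rw [pvSeg_shift cat ws [C] []]
        rw [PySem.List.enumerate_append]
        simp only [List.flatMap_append, List.length_cons, List.length_nil]
        rw [PySem.List.enumerate_cons, PySem.List.enumerate_nil]
        have := ih [] (k + 1)
        simp only [List.nil_append] at this
        rw [pvMark, if_pos h]
        simp only [List.flatMap_cons, List.flatMap_nil, List.append_nil, List.append_assoc]
        norm_num
        rw [this]
      · have e2 : pvStep cat ([], C) w = (([] : List (List String)), C ++ [w]) := by
          simp [pvStep, h]
        simp only [List.foldl_cons, e2]
        rw [ih (C ++ [w]) k, pvMark, if_neg h]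
        simp

-- B's reassembly fold, as a flatMap
theorem pvPieces (l : List (Int × List String)) (acc : List String) :
    l.foldl (fun acc p => acc ++ p.2 ++ ["{0[" ++ PySem.Int.toStr p.1 ++ "]}"]) acc
      = acc ++ l.flatMap (fun p => p.2 ++ [pvPh p.1]) := by
  induction l generalizing acc with
  | nil => simp
  | cons p l ih => simp [pvPh, List.flatMap_def]

-- ===== VERDICT (by name: the statement is the Claim_ definition above) =====
theorem schematize_spec : Claim_equal_schematize := by
  intro sentence cat _
  unfold Spec_schematize schematize schematize_alt
  dsimp only
  rw [pvA_loop]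
  rw [pvPieces]
  have hb := pvB_loop cat ((PySem.Chars.splitOn sentence.toList [' ']).map String.ofList) [] 0
  simp only [List.nil_append] at hb
  have : ∀ ws : List String,
      ws.foldl (fun (st : List (List String) × List String) w =>
        if w == cat then (st.1 ++ [st.2], ([] : List String)) else (st.1, st.2 ++ [w]))
        ([], []) = ws.foldl (pvStep cat) ([], []) := by
    intro ws; rfl
  rw [this]
  simp only [List.nil_append]
  rw [hb]
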